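-- pv_equiv track=rewrite | github.com/Khaira12411/hattena | utils/functions/stats_and_abilities_functions.py | normalize_pokemon_name
-- ===== SOURCE A (Python) =====
-- def normalize_pokemon_name(name):
--     """
--     Convert user input like 'mega-absol' or 'gigantamax-alcremie' to PokéAPI key.
--     Handles Mega, Gigantamax, Primal, and regional forms.
--     Also strips 'golden' or 'shiny' prefix if present.
--
--     Special note: For Shedinja's Wonder Guard, only fire, flying, rock, ghost, and dark can hit it.
--     """
--     name = name.lower().replace(" ", "-")
--     # Remove golden or shiny prefix
--     if name.startswith("golden-"):
--         name = name[7:]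
--     elif name.startswith("shiny-"):
--         name = name[6:]
--     # Mega forms
--     if name.startswith("mega-"):
--         base = name[5:]
--         # Handle possible -x or -y
--         if base.endswith("-x") or base.endswith("-y"):
--             return f"{base[:-2]}-mega-{base[-1]}"
--         return f"{base}-mega"
--     # Gigantamax forms
--     if name.startswith("gigantamax-"):
--         base = name[11:]
--         return f"{base}-gmax"
--     # Primal forms
--     if name.startswith("primal-"):
--         base = name[7:]
--         return f"{base}-primal"
--     # Alolan, Galarian, Hisuian, Paldean, etc.
--     for region in ["alolan", "galarian", "hisuian", "paldean"]:
--         if name.startswith(f"{region}-"):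
--             base = name[len(region) + 1 :]
--             return f"{base}-{region}"
--     return name
-- ===== SOURCE B (Python) =====
-- _FORM_SUFFIX = {
--     "gigantamax": "gmax",
--     "primal": "primal",
--     "alolan": "alolan",
--     "galarian": "galarian",
--     "hisuian": "hisuian",
--     "paldean": "paldean",
-- }
--
--
-- def normalize_pokemon_name(name):
--     """Tokenize on '-' and dispatch on the token list instead of prefix slicing."""
--     tokens = name.lower().replace(" ", "-").split("-")
--     # golden/shiny tag: drop the first token (once)
--     if tokens[0] in ("golden", "shiny") and len(tokens) > 1:
--         tokens = tokens[1:]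
--     # Mega: move the 'mega' token behind the base, keeping an x/y tag last
--     if tokens[0] == "mega" and len(tokens) > 1:
--         rest = tokens[1:]
--         if len(rest) > 1 and rest[-1] in ("x", "y"):
--             return "-".join(rest[:-1]) + "-mega-" + rest[-1]
--         return "-".join(rest) + "-mega"
--     # Other form words: move behind the base, renamed by the table
--     suffix = _FORM_SUFFIX.get(tokens[0])
--     if suffix is not None and len(tokens) > 1:
--         return "-".join(tokens[1:]) + "-" + suffix
--     return "-".join(tokens)
-- ===== Notes on version B (the rewrite author's own statement) =====
-- stated objective: alternative
-- what changed: B splits the name into a token list on the dash separator once and dispatches on that list (drop, move or rename whole tokens, then rejoin), instead of A's chain of startswith prefix tests with string slicing and suffix concatenation.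
import Mathlib
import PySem

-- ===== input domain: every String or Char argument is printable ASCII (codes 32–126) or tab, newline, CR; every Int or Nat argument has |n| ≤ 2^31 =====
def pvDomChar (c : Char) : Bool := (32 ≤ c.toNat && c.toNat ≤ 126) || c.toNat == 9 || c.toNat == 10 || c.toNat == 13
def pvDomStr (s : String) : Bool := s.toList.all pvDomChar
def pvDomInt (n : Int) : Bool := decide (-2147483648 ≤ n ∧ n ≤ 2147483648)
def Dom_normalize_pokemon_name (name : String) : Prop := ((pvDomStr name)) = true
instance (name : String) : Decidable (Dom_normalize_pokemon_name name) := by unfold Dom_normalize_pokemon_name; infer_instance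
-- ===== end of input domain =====

-- B tokenizes the name on '-' once and dispatches on the token list (drop / move /
-- rename whole tokens, then rejoin), instead of A's chain of startswith prefix tests
-- with string slicing; objective: alternative (token-level algorithm, same cost).

-- ===== PORT A =====
-- the golden/shiny strip (the if/elif at the top of A)
def pvStripA (n0 : List Char) : List Char :=
  if PySem.Chars.startswith n0 "golden-".toList then PySem.Chars.slice n0 (some 7) none
  else if PySem.Chars.startswith n0 "shiny-".toList then PySem.Chars.slice n0 (some 6) none
  else n0

-- the mega/gigantamax/primal/regional branch chain of A; base[-1] is in range
-- whenever the endswith guard holds, so pyGetD's default is never used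
def pvCoreA (n1 : List Char) : String :=
  if PySem.Chars.startswith n1 "mega-".toList then
    let base := PySem.Chars.slice n1 (some 5) none
    if PySem.Chars.endswith base "-x".toList || PySem.Chars.endswith base "-y".toList then
      String.ofList (PySem.Chars.slice base none (some (-2)) ++ "-mega-".toList
                     ++ [PySem.List.pyGetD base (-1) ' '])
    else
      String.ofList (base ++ "-mega".toList)
  else if PySem.Chars.startswith n1 "gigantamax-".toList then
    String.ofList (PySem.Chars.slice n1 (some 11) none ++ "-gmax".toList)
  else if PySem.Chars.startswith n1 "primal-".toList then
    String.ofList (PySem.Chars.slice n1 (some 7) none ++ "-primal".toList)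
  else
    -- 'for region in [...]: if name.startswith(region + "-"): return base + "-" + region'
    match ["alolan", "galarian", "hisuian", "paldean"].find?
            (fun region => PySem.Chars.startswith n1 (region.toList ++ ['-'])) with
    | some region =>
        String.ofList (PySem.Chars.slice n1 (some (PySem.Chars.len region.toList + 1)) none
                       ++ ['-'] ++ region.toList)
    | none => String.ofList n1

def normalize_pokemon_name (name : String) : String :=
  pvCoreA (pvStripA (PySem.Chars.replace (PySem.Chars.lower name.toList) " ".toList "-".toList))

-- ===== PORT B =====
def pvForms : PySem.Dict (List Char) (List Char) :=
  PySem.Dict.mk [("gigantamax".toList, "gmax".toList), ("primal".toList, "primal".toList),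
                 ("alolan".toList, "alolan".toList), ("galarian".toList, "galarian".toList),
                 ("hisuian".toList, "hisuian".toList), ("paldean".toList, "paldean".toList)]

-- B's dispatch on the token list; the token list of a split is never empty, so the
-- defaults of headD/getLastD (Python's tokens[0], rest[-1]) are never used
def pvCoreB (ts : List (List Char)) : String :=
  if ts.headD [] = "mega".toList ∧ 1 < ts.length then
    let rest := ts.tail
    if 1 < rest.length ∧ (rest.getLastD [] = ['x'] ∨ rest.getLastD [] = ['y']) then
      String.ofList (PySem.Chars.join ['-'] rest.dropLast ++ "-mega-".toList ++ rest.getLastD [])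
    else
      String.ofList (PySem.Chars.join ['-'] rest ++ "-mega".toList)
  else
    match pvForms.get? (ts.headD []) with
    | some suffix =>
        if 1 < ts.length then
          String.ofList (PySem.Chars.join ['-'] ts.tail ++ ['-'] ++ suffix)
        else String.ofList (PySem.Chars.join ['-'] ts)
    | none => String.ofList (PySem.Chars.join ['-'] ts)

def normalize_pokemon_name_alt (name : String) : String :=
  let ts0 := PySem.Chars.splitOn
    (PySem.Chars.replace (PySem.Chars.lower name.toList) " ".toList "-".toList) "-".toList
  let ts := if (ts0.headD [] = "golden".toList ∨ ts0.headD [] = "shiny".toList) ∧ 1 < ts0.length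
            then ts0.tail else ts0
  pvCoreB ts

-- ===== PRECONDITION & SPEC =====
def Spec_normalize_pokemon_name (name : String) (out : String) : Prop := out = normalize_pokemon_name_alt name
instance (name : String) (out : String) : Decidable (Spec_normalize_pokemon_name name out) := by unfold Spec_normalize_pokemon_name; infer_instance

-- ===== CLAIM (what is proved, stated in full; the proofs are below) =====
def Claim_equal_normalize_pokemon_name : Prop := ∀ (name : String), Dom_normalize_pokemon_name name → Spec_normalize_pokemon_name name (normalize_pokemon_name name)

-- ===== LEMMAS AND PROOFS =====

-- structural model of s.split("-")
def pvSp : List Char → List (List Char)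
  | [] => [[]]
  | c :: rest => if c = '-' then [] :: pvSp rest else (pvSp rest).modifyHead (c :: ·)

theorem pvSp_ne_nil (l : List Char) : pvSp l ≠ [] := by
  induction l with
  | nil => simp [pvSp]
  | cons c rest ih =>
    simp only [pvSp]
    split
    · simp
    · cases h : pvSp rest with
      | nil => exact absurd h ih
      | cons a t => simp

theorem pvGo_eq (fuel : Nat) : ∀ (l cur : List Char) (acc : List (List Char)),
    l.length < fuel →
    PySem.Chars.splitOn.go ['-'] fuel l cur acc
      = acc.reverse ++ (pvSp l).modifyHead (cur.reverse ++ ·) := by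
  induction fuel with
  | zero => intro l cur acc h; omega
  | succ f ih =>
    intro l cur acc h
    cases l with
    | nil => simp [PySem.Chars.splitOn.go, pvSp]
    | cons c rest =>
      by_cases hc : c = '-'
      · subst hc
        have hp : List.isPrefixOf ['-'] ('-' :: rest) = true := by simp [List.isPrefixOf]
        rw [PySem.Chars.splitOn.go]
        simp only [hp, if_true]
        rw [show List.drop (['-'] : List Char).length ('-' :: rest) = rest from rfl]
        rw [ih rest [] (cur.reverse :: acc) (by simpa using Nat.lt_of_succ_lt_succ h)]
        simp only [pvSp, if_true, List.reverse_cons, List.reverse_nil, List.nil_append]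
        cases hsp : pvSp rest with
        | nil => exact absurd hsp (pvSp_ne_nil rest)
        | cons a t => simp
      · have hp : List.isPrefixOf ['-'] (c :: rest) = false := by
          simp [List.isPrefixOf]; exact fun hcc => (hc hcc.symm).elim
        rw [PySem.Chars.splitOn.go]
        simp only [hp, Bool.false_eq_true, if_false]
        rw [ih rest (c :: cur) acc (by simpa using Nat.lt_of_succ_lt_succ h)]
        simp only [pvSp, hc, if_false, List.reverse_cons]
        cases hsp : pvSp rest with
        | nil => exact absurd hsp (pvSp_ne_nil rest)
        | cons a t => simp

theorem pvSplitOn_eq (l : List Char) : PySem.Chars.splitOn l "-".toList = pvSp l := by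
  show PySem.Chars.splitOn.go ['-'] (l.length + 1) l [] [] = pvSp l
  rw [pvGo_eq (l.length + 1) l [] [] (by omega)]
  cases h : pvSp l with
  | nil => exact absurd h (pvSp_ne_nil l)
  | cons a t => simp

theorem pvSp_no_dash (w : List Char) (h : '-' ∉ w) : pvSp w = [w] := by
  induction w with
  | nil => rfl
  | cons c rest ih =>
    have hc : c ≠ '-' := by intro hc; exact h (hc ▸ List.mem_cons_self)
    have := ih (fun hm => h (List.mem_cons_of_mem _ hm))
    simp [pvSp, hc, this]

theorem pvSp_append (r t : List Char) : pvSp (r ++ '-' :: t) = pvSp r ++ pvSp t := by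
  induction r with
  | nil => simp [pvSp]
  | cons c rest ih =>
    by_cases hc : c = '-'
    · subst hc; simp [pvSp, ih]
    · simp only [List.cons_append, pvSp, hc, if_false, ih]
      cases h : pvSp rest with
      | nil => exact absurd h (pvSp_ne_nil rest)
      | cons a u => simp

theorem pvJoin_pvSp (l : List Char) : PySem.Chars.join ['-'] (pvSp l) = l := by
  induction l with
  | nil => simp [pvSp, PySem.Chars.join_singleton]
  | cons c rest ih =>
    by_cases hc : c = '-'
    · subst hc
      simp only [pvSp, if_true]
      cases h : pvSp rest with
      | nil => exact absurd h (pvSp_ne_nil rest)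
      | cons a t =>
        rw [PySem.Chars.join_cons_cons, ← h, ih]; simp
    · simp only [pvSp, hc, if_false]
      cases h : pvSp rest with
      | nil => exact absurd h (pvSp_ne_nil rest)
      | cons a t =>
        cases t with
        | nil => rw [← ih, h]; simp [PySem.Chars.join_singleton]
        | cons b u =>
          simp only [List.modifyHead_cons]
          conv_rhs => rw [← ih, h]
          rw [PySem.Chars.join_cons_cons, PySem.Chars.join_cons_cons]
          simp

theorem pvJoin_append_last (t0 x : List Char) (ts : List (List Char)) :
    PySem.Chars.join ['-'] ((t0 :: ts) ++ [x])
      = PySem.Chars.join ['-'] (t0 :: ts) ++ '-' :: x := by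
  induction ts generalizing t0 with
  | nil =>
    rw [List.cons_append, List.nil_append, PySem.Chars.join_cons_cons,
        PySem.Chars.join_singleton, PySem.Chars.join_singleton]
    simp
  | cons b u ih =>
    calc PySem.Chars.join ['-'] (t0 :: ((b :: u) ++ [x]))
        = PySem.Chars.join ['-'] (t0 :: b :: (u ++ [x])) := by rw [List.cons_append]
      _ = t0 ++ ['-'] ++ PySem.Chars.join ['-'] (b :: (u ++ [x])) :=
          PySem.Chars.join_cons_cons _ _ _ _
      _ = t0 ++ ['-'] ++ PySem.Chars.join ['-'] ((b :: u) ++ [x]) := by rw [List.cons_append]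
      _ = t0 ++ ['-'] ++ (PySem.Chars.join ['-'] (b :: u) ++ '-' :: x) := by rw [ih b]
      _ = PySem.Chars.join ['-'] (t0 :: b :: u) ++ '-' :: x := by
          rw [PySem.Chars.join_cons_cons]; simp

-- a token list with head w and a nonempty tail comes from a 'w-…' string
theorem pvSp_head_tail (l w : List Char) (rest : List (List Char))
    (h : pvSp l = w :: rest) (hne : rest ≠ []) :
    l = w ++ '-' :: PySem.Chars.join ['-'] rest := by
  cases rest with
  | nil => exact absurd rfl hne
  | cons a t =>
    have := pvJoin_pvSp l
    rw [h, PySem.Chars.join_cons_cons] at this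
    simpa using this.symm

theorem pvStartswith_ex (l w : List Char) :
    PySem.Chars.startswith l (w ++ ['-']) = true ↔ ∃ r, l = w ++ '-' :: r := by
  rw [PySem.Chars.startswith_iff]
  constructor
  · rintro ⟨r, hr⟩; exact ⟨r, by simpa using hr.symm⟩
  · rintro ⟨r, hr⟩; exact ⟨r, by simp [hr]⟩

theorem pvSp_of_prefix (w r : List Char) (h : '-' ∉ w) :
    pvSp (w ++ '-' :: r) = w :: pvSp r := by
  rw [pvSp_append, pvSp_no_dash w h]; rfl

theorem pvDrop_pre (w r : List Char) : List.drop (w.length + 1) (w ++ '-' :: r) = r := by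
  rw [show w ++ '-' :: r = (w ++ ['-']) ++ r by simp, List.drop_left' (by simp)]

-- a true B-side token guard forces the corresponding A-side prefix test
theorem pvB_guard_imp (l w : List Char) (hh : (pvSp l).headD [] = w)
    (hl : 1 < (pvSp l).length) : PySem.Chars.startswith l (w ++ ['-']) = true := by
  cases hsp : pvSp l with
  | nil => exact absurd hsp (pvSp_ne_nil l)
  | cons a t =>
    cases t with
    | nil => rw [hsp] at hl; simp at hl
    | cons b u =>
      rw [hsp] at hh; simp at hh
      rw [pvStartswith_ex]
      exact ⟨PySem.Chars.join ['-'] (b :: u), by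
        rw [← hh]; exact pvSp_head_tail l a (b :: u) hsp (by simp)⟩

-- facts available in a positive prefix case
theorem pvPos_facts (l w r : List Char) (hw : '-' ∉ w) (hr : l = w ++ '-' :: r) :
    pvSp l = w :: pvSp r ∧ 1 < (pvSp l).length := by
  have h1 : pvSp l = w :: pvSp r := by rw [hr]; exact pvSp_of_prefix w r hw
  refine ⟨h1, ?_⟩
  rw [h1]
  cases h : pvSp r with
  | nil => exact absurd h (pvSp_ne_nil r)
  | cons a t => simp

-- the strip stage: A's slicing and B's token drop agree
theorem pvStrip_eq (l : List Char) :
    pvSp (pvStripA l)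
      = (if (((pvSp l).headD [] = "golden".toList ∨ (pvSp l).headD [] = "shiny".toList)
             ∧ 1 < (pvSp l).length)
         then (pvSp l).tail else pvSp l) := by
  by_cases hg : PySem.Chars.startswith l "golden-".toList = true
  · obtain ⟨r, hr⟩ := (pvStartswith_ex l "golden".toList).1 hg
    obtain ⟨h1, h2⟩ := pvPos_facts l "golden".toList r (by decide) hr
    rw [pvStripA, if_pos hg, h1]
    have hcond : (("golden".toList :: pvSp r).headD [] = "golden".toList
        ∨ ("golden".toList :: pvSp r).headD [] = "shiny".toList)
        ∧ 1 < ("golden".toList :: pvSp r).length := ⟨Or.inl (by simp), h1 ▸ h2⟩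
    rw [if_pos hcond]
    rw [hr, PySem.Chars.slice_eq_listSlice, PySem.List.slice_from _ (by norm_num)]
    rw [show ((7 : Int).toNat) = "golden".toList.length + 1 from rfl, pvDrop_pre]
    simp
  · by_cases hs : PySem.Chars.startswith l "shiny-".toList = true
    · obtain ⟨r, hr⟩ := (pvStartswith_ex l "shiny".toList).1 hs
      obtain ⟨h1, h2⟩ := pvPos_facts l "shiny".toList r (by decide) hr
      rw [pvStripA, if_neg hg, if_pos hs, h1]
      have hcond : (("shiny".toList :: pvSp r).headD [] = "golden".toList
          ∨ ("shiny".toList :: pvSp r).headD [] = "shiny".toList)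
          ∧ 1 < ("shiny".toList :: pvSp r).length := ⟨Or.inr (by simp), h1 ▸ h2⟩
      rw [if_pos hcond]
      rw [hr, PySem.Chars.slice_eq_listSlice, PySem.List.slice_from _ (by norm_num)]
      rw [show ((6 : Int).toNat) = "shiny".toList.length + 1 from rfl, pvDrop_pre]
      simp
    · rw [pvStripA, if_neg hg, if_neg hs, if_neg]
      rintro ⟨hh | hh, hl⟩
      · exact hg (pvB_guard_imp l "golden".toList hh hl)
      · exact hs (pvB_guard_imp l "shiny".toList hh hl)

-- B-side facts in the positive mega -x/-y case: base = r' ++ ['-', c]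
theorem pvTail_facts (r' : List Char) (c : Char) (hc : c ≠ '-') :
    pvSp (r' ++ ['-', c]) = pvSp r' ++ [[c]]
      ∧ (pvSp (r' ++ ['-', c])).getLastD [] = [c]
      ∧ (pvSp (r' ++ ['-', c])).dropLast = pvSp r'
      ∧ 1 < (pvSp (r' ++ ['-', c])).length := by
  have h1 : pvSp (r' ++ ['-', c]) = pvSp r' ++ [[c]] := by
    rw [show r' ++ ['-', c] = r' ++ '-' :: [c] from rfl, pvSp_append,
        pvSp_no_dash [c] (by simp only [List.mem_singleton]; exact fun h => hc h.symm)]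
  refine ⟨h1, by simp [h1], by simp [h1], ?_⟩
  rw [h1]
  cases h : pvSp r' with
  | nil => exact absurd h (pvSp_ne_nil r')
  | cons a t => simp

-- a true B-side last-token guard forces A's endswith test
theorem pvB_last_imp (b : List Char) (c : Char)
    (hl : 1 < (pvSp b).length) (hh : (pvSp b).getLastD [] = [c]) :
    PySem.Chars.endswith b (['-', c]) = true := by
  have hne := pvSp_ne_nil b
  obtain ⟨ts, x, hx⟩ : ∃ ts x, pvSp b = ts ++ [x] := by
    rcases List.eq_nil_or_concat (pvSp b) with h | ⟨ts, x, h⟩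
    · exact absurd h hne
    · exact ⟨ts, x, by simpa [List.concat_eq_append] using h⟩
  have hts : ts ≠ [] := by
    rintro rfl; rw [hx] at hl; simp at hl
  have hxc : x = [c] := by rw [hx] at hh; simpa using hh
  subst hxc
  obtain ⟨t0, ts', hts'⟩ : ∃ t0 ts', ts = t0 :: ts' := by
    cases ts with
    | nil => exact absurd rfl hts
    | cons t0 ts' => exact ⟨t0, ts', rfl⟩
  rw [PySem.Chars.endswith_iff]
  have hjoin := pvJoin_pvSp b
  rw [hx, hts', pvJoin_append_last] at hjoin
  exact ⟨PySem.Chars.join ['-'] (t0 :: ts'), by simpa using hjoin⟩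

-- if the form-table lookup hits, the key is one of the six form words
theorem pvForms_key (k v : List Char) (h : pvForms.get? k = some v) :
    k = "gigantamax".toList ∨ k = "primal".toList ∨ k = "alolan".toList
      ∨ k = "galarian".toList ∨ k = "hisuian".toList ∨ k = "paldean".toList := by
  rw [pvForms] at h
  simp only [PySem.Dict.get?_mk_cons] at h
  split_ifs at h with h1 h2 h3 h4 h5 h6
  · exact Or.inl (Eq.symm (by simpa using h1))
  · exact Or.inr (Or.inl (Eq.symm (by simpa using h2)))
  · exact Or.inr (Or.inr (Or.inl (Eq.symm (by simpa using h3))))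
  · exact Or.inr (Or.inr (Or.inr (Or.inl (Eq.symm (by simpa using h4)))))
  · exact Or.inr (Or.inr (Or.inr (Or.inr (Or.inl (Eq.symm (by simpa using h5))))))
  · exact Or.inr (Or.inr (Or.inr (Or.inr (Or.inr (Eq.symm (by simpa using h6))))))
  · simp [PySem.Dict.get?] at h

-- one positive non-mega form branch of B: it returns base ++ '-' ++ suffix
theorem pvForm_pos (l w suf r : List Char) (hw : '-' ∉ w) (hr : l = w ++ '-' :: r)
    (hget : pvForms.get? w = some suf) (hm : ¬ (w = "mega".toList)) :
    pvCoreB (pvSp l) = String.ofList (r ++ '-' :: suf) := by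
  obtain ⟨h1, h2⟩ := pvPos_facts l w r hw hr
  rw [pvCoreB, h1]
  have hnot : ¬ ((w :: pvSp r).headD [] = "mega".toList ∧ 1 < (w :: pvSp r).length) := by
    rintro ⟨hh, -⟩; exact hm (by simpa using hh)
  rw [if_neg hnot]
  simp only [List.headD_cons, List.tail_cons, hget]
  have hlen : 1 < (w :: pvSp r).length := h1 ▸ h2
  rw [if_pos hlen, pvJoin_pvSp]
  simp

theorem pvCore_eq (l : List Char) : pvCoreA l = pvCoreB (pvSp l) := by
  by_cases hm : PySem.Chars.startswith l "mega-".toList = true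
  · -- mega branch
    obtain ⟨r, hr⟩ := (pvStartswith_ex l "mega".toList).1 hm
    obtain ⟨h1, h2⟩ := pvPos_facts l "mega".toList r (by decide) hr
    have hbase : PySem.Chars.slice l (some 5) none = r := by
      rw [hr, PySem.Chars.slice_eq_listSlice, PySem.List.slice_from _ (by norm_num)]
      rw [show ((5 : Int).toNat) = "mega".toList.length + 1 from rfl, pvDrop_pre]
    rw [pvCoreA, pvCoreB, if_pos hm, h1]
    simp only [List.headD_cons, List.tail_cons, hbase]
    rw [if_pos (show True ∧ 1 < ("mega".toList :: pvSp r).length from ⟨trivial, h1 ▸ h2⟩)]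
    by_cases hx : PySem.Chars.endswith r "-x".toList = true
    · obtain ⟨r', hr'⟩ := (PySem.Chars.endswith_iff r "-x".toList).1 hx
      have hr'' : r = r' ++ ['-', 'x'] := by simpa using hr'.symm
      obtain ⟨e1, e2, e3, e4⟩ := pvTail_facts r' 'x' (by decide)
      rw [← hr''] at e1 e2 e3 e4
      rw [if_pos (show (PySem.Chars.endswith r "-x".toList
            || PySem.Chars.endswith r "-y".toList) = true from by
        simp only [Bool.or_eq_true]; exact Or.inl hx)]
      have hinner : 1 < (pvSp r).length
          ∧ ((pvSp r).getLastD [] = ['x'] ∨ (pvSp r).getLastD [] = ['y']) := ⟨e4, Or.inl e2⟩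
      rw [if_pos hinner, e2, e3, pvJoin_pvSp, hr'']
      rw [show PySem.Chars.slice (r' ++ ['-', 'x']) none (some (-2)) = r' from by
        simp [PySem.Chars.slice_eq_listSlice, PySem.List.slice]]
      rw [show PySem.List.pyGetD (r' ++ ['-', 'x']) (-1) ' ' = 'x' from by
        simp [PySem.List.pyGetD, PySem.List.pyGet?, PySem.List.pyIdx?]]
    · by_cases hy : PySem.Chars.endswith r "-y".toList = true
      · obtain ⟨r', hr'⟩ := (PySem.Chars.endswith_iff r "-y".toList).1 hy
        have hr'' : r = r' ++ ['-', 'y'] := by simpa using hr'.symm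
        obtain ⟨e1, e2, e3, e4⟩ := pvTail_facts r' 'y' (by decide)
        rw [← hr''] at e1 e2 e3 e4
        rw [if_pos (show (PySem.Chars.endswith r "-x".toList
              || PySem.Chars.endswith r "-y".toList) = true from by
          simp only [Bool.or_eq_true]; exact Or.inr hy)]
        have hinner : 1 < (pvSp r).length
            ∧ ((pvSp r).getLastD [] = ['x'] ∨ (pvSp r).getLastD [] = ['y']) := ⟨e4, Or.inr e2⟩
        rw [if_pos hinner, e2, e3, pvJoin_pvSp, hr'']
        rw [show PySem.Chars.slice (r' ++ ['-', 'y']) none (some (-2)) = r' from by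
          simp [PySem.Chars.slice_eq_listSlice, PySem.List.slice]]
        rw [show PySem.List.pyGetD (r' ++ ['-', 'y']) (-1) ' ' = 'y' from by
          simp [PySem.List.pyGetD, PySem.List.pyGet?, PySem.List.pyIdx?]]
      · rw [if_neg (show ¬ (PySem.Chars.endswith r "-x".toList
              || PySem.Chars.endswith r "-y".toList) = true from by
            simp only [Bool.or_eq_true]
            rintro (h | h)
            exacts [hx h, hy h])]
        rw [if_neg (show ¬ (1 < (pvSp r).length
              ∧ ((pvSp r).getLastD [] = ['x'] ∨ (pvSp r).getLastD [] = ['y'])) from by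
            rintro ⟨hl, hc | hc⟩
            · exact hx (pvB_last_imp r 'x' hl hc)
            · exact hy (pvB_last_imp r 'y' hl hc))]
        rw [pvJoin_pvSp]
  · -- non-mega branches
    have hmB : ¬ ((pvSp l).headD [] = "mega".toList ∧ 1 < (pvSp l).length) := by
      rintro ⟨hh, hl⟩
      exact hm (pvB_guard_imp l "mega".toList hh hl)
    by_cases hgg : PySem.Chars.startswith l "gigantamax-".toList = true
    · obtain ⟨r, hr⟩ := (pvStartswith_ex l "gigantamax".toList).1 hgg
      rw [pvCoreA, if_neg hm, if_pos hgg]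
      rw [pvForm_pos l "gigantamax".toList "gmax".toList r (by decide) hr (by decide) (by decide)]
      rw [hr, PySem.Chars.slice_eq_listSlice, PySem.List.slice_from _ (by norm_num)]
      rw [show ((11 : Int).toNat) = "gigantamax".toList.length + 1 from rfl, pvDrop_pre]
      rfl
    · by_cases hpr : PySem.Chars.startswith l "primal-".toList = true
      · obtain ⟨r, hr⟩ := (pvStartswith_ex l "primal".toList).1 hpr
        rw [pvCoreA, if_neg hm, if_neg hgg, if_pos hpr]
        rw [pvForm_pos l "primal".toList "primal".toList r (by decide) hr (by decide) (by decide)]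
        rw [hr, PySem.Chars.slice_eq_listSlice, PySem.List.slice_from _ (by norm_num)]
        rw [show ((7 : Int).toNat) = "primal".toList.length + 1 from rfl, pvDrop_pre]
        rfl
      · rw [pvCoreA, if_neg hm, if_neg hgg, if_neg hpr]
        by_cases ha : PySem.Chars.startswith l ("alolan".toList ++ ['-']) = true
        · obtain ⟨r, hr⟩ := (pvStartswith_ex l "alolan".toList).1 ha
          rw [show (["alolan", "galarian", "hisuian", "paldean"].find?
              (fun region => PySem.Chars.startswith l (region.toList ++ ['-']))) = some "alolan" from by
            simp only [List.find?_cons, ha]]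
          dsimp only
          rw [pvForm_pos l "alolan".toList "alolan".toList r (by decide) hr (by decide) (by decide)]
          rw [hr, PySem.Chars.slice_eq_listSlice, PySem.List.slice_from _ (by decide)]
          rw [show ((PySem.Chars.len "alolan".toList + 1 : Int).toNat)
                = "alolan".toList.length + 1 from by decide, pvDrop_pre]
          simp
        · by_cases hga : PySem.Chars.startswith l ("galarian".toList ++ ['-']) = true
          · obtain ⟨r, hr⟩ := (pvStartswith_ex l "galarian".toList).1 hga
            rw [show (["alolan", "galarian", "hisuian", "paldean"].find?
                (fun region => PySem.Chars.startswith l (region.toList ++ ['-']))) = some "galarian" from by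
              simp only [List.find?_cons, ha, hga]]
            dsimp only
            rw [pvForm_pos l "galarian".toList "galarian".toList r (by decide) hr (by decide) (by decide)]
            rw [hr, PySem.Chars.slice_eq_listSlice, PySem.List.slice_from _ (by decide)]
            rw [show ((PySem.Chars.len "galarian".toList + 1 : Int).toNat)
                  = "galarian".toList.length + 1 from by decide, pvDrop_pre]
            simp
          · by_cases hhi : PySem.Chars.startswith l ("hisuian".toList ++ ['-']) = true
            · obtain ⟨r, hr⟩ := (pvStartswith_ex l "hisuian".toList).1 hhi
              rw [show (["alolan", "galarian", "hisuian", "paldean"].find?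
                  (fun region => PySem.Chars.startswith l (region.toList ++ ['-']))) = some "hisuian" from by
                simp only [List.find?_cons, ha, hga, hhi]]
              dsimp only
              rw [pvForm_pos l "hisuian".toList "hisuian".toList r (by decide) hr (by decide) (by decide)]
              rw [hr, PySem.Chars.slice_eq_listSlice, PySem.List.slice_from _ (by decide)]
              rw [show ((PySem.Chars.len "hisuian".toList + 1 : Int).toNat)
                    = "hisuian".toList.length + 1 from by decide, pvDrop_pre]
              simp
            · by_cases hpa : PySem.Chars.startswith l ("paldean".toList ++ ['-']) = true
              · obtain ⟨r, hr⟩ := (pvStartswith_ex l "paldean".toList).1 hpa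
                rw [show (["alolan", "galarian", "hisuian", "paldean"].find?
                    (fun region => PySem.Chars.startswith l (region.toList ++ ['-']))) = some "paldean" from by
                  simp only [List.find?_cons, ha, hga, hhi, hpa]]
                dsimp only
                rw [pvForm_pos l "paldean".toList "paldean".toList r (by decide) hr (by decide) (by decide)]
                rw [hr, PySem.Chars.slice_eq_listSlice, PySem.List.slice_from _ (by decide)]
                rw [show ((PySem.Chars.len "paldean".toList + 1 : Int).toNat)
                      = "paldean".toList.length + 1 from by decide, pvDrop_pre]
                simp
              · -- nothing matched: both return the name unchanged
                rw [show (["alolan", "galarian", "hisuian", "paldean"].find?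
                    (fun region => PySem.Chars.startswith l (region.toList ++ ['-']))) = none from by
                  simp only [List.find?_cons, ha, hga, hhi, hpa, List.find?_nil]]
                rw [pvCoreB, if_neg hmB]
                cases hget : pvForms.get? ((pvSp l).headD []) with
                | none => dsimp only; rw [pvJoin_pvSp]
                | some suf =>
                  dsimp only
                  rw [if_neg, pvJoin_pvSp]
                  intro hl
                  rcases pvForms_key _ _ hget with hk | hk | hk | hk | hk | hk
                  · exact hgg (pvB_guard_imp l "gigantamax".toList hk hl)
                  · exact hpr (pvB_guard_imp l "primal".toList hk hl)
                  · exact ha (pvB_guard_imp l "alolan".toList hk hl)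
                  · exact hga (pvB_guard_imp l "galarian".toList hk hl)
                  · exact hhi (pvB_guard_imp l "hisuian".toList hk hl)
                  · exact hpa (pvB_guard_imp l "paldean".toList hk hl)

theorem pv_main (name : String) :
    normalize_pokemon_name name = normalize_pokemon_name_alt name := by
  simp only [normalize_pokemon_name, normalize_pokemon_name_alt, pvSplitOn_eq]
  rw [pvCore_eq, pvStrip_eq]

-- ===== VERDICT (by name: the statement is the Claim_ definition above) =====
theorem normalize_pokemon_name_spec : Claim_equal_normalize_pokemon_name := by
  intro name _
  unfold Spec_normalize_pokemon_name
  exact pv_main name
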